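-- pv_equiv track=rewrite | github.com/HarshitM567/NLP | Finding sentence.py | find_sentences
-- ===== SOURCE A (Python) =====
-- punctuation_marks = ['!', '?', '%', '.']
--
-- def find_sentences(text, ending):
--     sentences = []
--     sentence = ""
--     for char in text:
--         sentence += char
--         if char in punctuation_marks:
--             if char == ending:
--                 sentences.append(sentence.strip())
--             sentence = ""
--     return sentences
-- ===== SOURCE B (Python) =====
-- import re
--
-- def find_sentences(text, ending):
--     parts = re.split(r'([!?%.])', text)
--     # parts = [run0, d0, run1, d1, ..., run_k]; the trailing run has no delimiter
--     return [(parts[i] + parts[i + 1]).strip()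
--             for i in range(0, len(parts) - 1, 2)
--             if parts[i + 1] == ending]
-- ===== Notes on version B (the rewrite author's own statement) =====
-- stated objective: faster
-- what changed: Replaces the char-by-char Python accumulator loop with a single regex split keeping the delimiters, then pairs each run with its delimiter and filters/strips in one comprehension.
import Mathlib
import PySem

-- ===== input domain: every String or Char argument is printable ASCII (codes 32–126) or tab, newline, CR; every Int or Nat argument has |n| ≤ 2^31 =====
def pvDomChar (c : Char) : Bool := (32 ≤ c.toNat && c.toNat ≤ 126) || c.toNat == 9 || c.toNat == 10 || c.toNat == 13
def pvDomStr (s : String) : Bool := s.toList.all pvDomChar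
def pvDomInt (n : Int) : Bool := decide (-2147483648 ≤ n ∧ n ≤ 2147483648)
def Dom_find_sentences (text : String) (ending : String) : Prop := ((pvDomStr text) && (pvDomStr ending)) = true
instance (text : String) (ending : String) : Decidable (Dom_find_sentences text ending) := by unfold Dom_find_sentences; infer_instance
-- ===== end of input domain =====

-- B replaces A's char-by-char accumulator loop with a regex split keeping the delimiters
-- (re.split(r'([!?%.])', text), ported by hand) followed by a pair-filter-strip comprehension; objective: faster (constant-factor, measured).

-- ===== PORT A =====
-- punctuation_marks = ['!', '?', '%', '.']
def pvPunctuationMarks : List Char := ['!', '?', '%', '.']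

-- literal transliteration of A's loop: state = (sentences, sentence)
def find_sentences (text : String) (ending : String) : List String :=
  let st := text.toList.foldl
    (fun (st : List String × List Char) c =>
      let sentence := st.2 ++ [c]
      if c ∈ pvPunctuationMarks then
        (if String.mk [c] == ending then st.1 ++ [PySem.Str.strip (String.mk sentence)] else st.1, [])
      else
        (st.1, sentence))
    ([], [])
  st.1

-- ===== PORT B =====
def pvIsPunct (c : Char) : Bool := c == '!' || c == '?' || c == '%' || c == '.'

-- hand port of re.split(r'([!?%.])', text): the alternating list
-- [run0, [d0], run1, [d1], ..., run_k] of non-punctuation runs and single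
-- captured delimiter chars. Exact for this fixed one-char-class pattern.
def pvSplitKeep : List Char → List (List Char)
  | [] => [[]]
  | c :: cs =>
    if pvIsPunct c then [] :: [c] :: pvSplitKeep cs
    else
      match pvSplitKeep cs with
      | [] => [[c]]
      | p :: ps => (c :: p) :: ps

-- parts[i], parts[i+1] for i = 0, 2, 4, … while i + 1 < len(parts)
def pvPairs : List (List Char) → List (List Char × List Char)
  | run :: d :: rest => (run, d) :: pvPairs rest
  | _ => []

-- [(parts[i] + parts[i+1]).strip() for i in range(0, len(parts)-1, 2) if parts[i+1] == ending]
def find_sentences_alt (text : String) (ending : String) : List String :=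
  let parts := pvSplitKeep text.toList
  ((pvPairs parts).filter (fun p => String.mk p.2 == ending)).map
    (fun p => PySem.Str.strip (String.mk (p.1 ++ p.2)))

-- ===== PRECONDITION & SPEC =====
def Spec_find_sentences (text : String) (ending : String) (out : List String) : Prop := out = find_sentences_alt text ending
instance (text : String) (ending : String) (out : List String) : Decidable (Spec_find_sentences text ending out) := by unfold Spec_find_sentences; infer_instance

-- ===== CLAIM (what is proved, stated in full; the proofs are below) =====
def Claim_equal_find_sentences : Prop := ∀ (text : String) (ending : String), Dom_find_sentences text ending → Spec_find_sentences text ending (find_sentences text ending)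

-- ===== LEMMAS AND PROOFS =====

-- B's result, computed on a char list
def pvResult (ending : String) (l : List Char) : List String :=
  ((pvPairs (pvSplitKeep l)).filter (fun p => String.mk p.2 == ending)).map
    (fun p => PySem.Str.strip (String.mk (p.1 ++ p.2)))

lemma pvSplitKeep_all_nonpunct (pend : List Char) (h : ∀ c ∈ pend, pvIsPunct c = false) :
    pvSplitKeep pend = [pend] := by
  induction pend with
  | nil => rfl
  | cons c cs ih =>
    simp [pvSplitKeep, h c (by simp), ih (fun x hx => h x (by simp [hx]))]

lemma pvSplitKeep_flush (pend : List Char) (c : Char) (l : List Char)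
    (hp : ∀ x ∈ pend, pvIsPunct x = false) (hc : pvIsPunct c = true) :
    pvSplitKeep (pend ++ c :: l) = pend :: [c] :: pvSplitKeep l := by
  induction pend with
  | nil => simp [pvSplitKeep, hc]
  | cons d ds ih =>
    simp [pvSplitKeep, hp d (by simp), ih (fun x hx => hp x (by simp [hx]))]

lemma pvResult_nonpunct (ending : String) (pend : List Char)
    (hp : ∀ x ∈ pend, pvIsPunct x = false) : pvResult ending pend = [] := by
  simp [pvResult, pvSplitKeep_all_nonpunct pend hp, pvPairs]

lemma pvMem_punct_iff (c : Char) : (c ∈ pvPunctuationMarks) ↔ pvIsPunct c = true := by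
  simp [pvPunctuationMarks, pvIsPunct]
  tauto

-- the loop invariant: A's fold from state (acc, pend) computes acc ++ B-result of (pend ++ rest)
lemma pvLoop_invariant (ending : String) (rest : List Char) :
    ∀ (acc : List String) (pend : List Char), (∀ x ∈ pend, pvIsPunct x = false) →
    (rest.foldl
      (fun (st : List String × List Char) c =>
        let sentence := st.2 ++ [c]
        if c ∈ pvPunctuationMarks then
          (if String.mk [c] == ending then st.1 ++ [PySem.Str.strip (String.mk sentence)] else st.1, [])
        else
          (st.1, sentence))
      (acc, pend)).1 = acc ++ pvResult ending (pend ++ rest) := by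
  induction rest with
  | nil =>
    intro acc pend hp
    simp [pvResult_nonpunct ending pend hp]
  | cons c cs ih =>
    intro acc pend hp
    by_cases hc : pvIsPunct c = true
    · have hmem : c ∈ pvPunctuationMarks := (pvMem_punct_iff c).mpr hc
      simp only [List.foldl_cons, hmem, if_pos]
      rw [ih _ [] (by simp)]
      simp only [pvResult, List.nil_append, pvSplitKeep_flush pend c cs hp hc,
        pvPairs, List.filter_cons]
      by_cases he : String.mk [c] == ending
      · simp [he]
      · simp [he]
    · have hmem : c ∉ pvPunctuationMarks := fun h => hc ((pvMem_punct_iff c).mp h)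
      simp only [List.foldl_cons, hmem, if_false]
      rw [ih acc (pend ++ [c]) ?_]
      · simp
      · intro x hx
        rcases List.mem_append.mp hx with h | h
        · exact hp x h
        · simp at h; subst h; exact eq_false_of_ne_true hc

-- ===== VERDICT (by name: the statement is the Claim_ definition above) =====
theorem find_sentences_spec : Claim_equal_find_sentences := by
  intro text ending _
  unfold Spec_find_sentences find_sentences find_sentences_alt
  have h := pvLoop_invariant ending text.toList [] [] (by simp)
  simpa [pvResult] using h
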